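-- pv_equiv track=rewrite | github.com/ProyectoMod7/Proyecto-final | helpers/piezas_estado.py | calcular_estado_maquina
-- ===== SOURCE A (Python) =====
-- def calcular_estado_maquina(lista_piezas):
--     if not lista_piezas:
--         return {
--             "estado_texto": "Sin piezas",
--             "estado_color": "gray"
--         }
--
--     colores = [p.get("estado_color") for p in lista_piezas]
--
--     if "black" in colores:
--         return {"estado_texto": "Pieza rota", "estado_color": "black"}
--
--     if "red" in colores:
--         return {"estado_texto": "Vencida", "estado_color": "red"}
--
--     if "yellow" in colores:
--         return {"estado_texto": "Advertencia", "estado_color": "yellow"}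
--
--     return {"estado_texto": "Óptima", "estado_color": "green"}
-- ===== SOURCE B (Python) =====
-- def calcular_estado_maquina(lista_piezas):
--     if not lista_piezas:
--         return {"estado_texto": "Sin piezas", "estado_color": "gray"}
--     rank_of = {"black": 0, "red": 1, "yellow": 2}
--     results = [
--         {"estado_texto": "Pieza rota", "estado_color": "black"},
--         {"estado_texto": "Vencida", "estado_color": "red"},
--         {"estado_texto": "Advertencia", "estado_color": "yellow"},
--         {"estado_texto": "Óptima", "estado_color": "green"},
--     ]
--     best = 3
--     for p in lista_piezas:
--         r = rank_of.get(p.get("estado_color"), 3)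
--         if r < best:
--             best = r
--         if best == 0:
--             break
--     return results[best]
-- ===== Notes on version B (the rewrite author's own statement) =====
-- stated objective: alternative
-- what changed: Replaces the build-a-color-list-then-three-membership-scans decomposition by a single pass that maintains the minimum severity rank (black=0, red=1, yellow=2, other=3) with early exit on rank 0, then indexes a result table.
import Mathlib
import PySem

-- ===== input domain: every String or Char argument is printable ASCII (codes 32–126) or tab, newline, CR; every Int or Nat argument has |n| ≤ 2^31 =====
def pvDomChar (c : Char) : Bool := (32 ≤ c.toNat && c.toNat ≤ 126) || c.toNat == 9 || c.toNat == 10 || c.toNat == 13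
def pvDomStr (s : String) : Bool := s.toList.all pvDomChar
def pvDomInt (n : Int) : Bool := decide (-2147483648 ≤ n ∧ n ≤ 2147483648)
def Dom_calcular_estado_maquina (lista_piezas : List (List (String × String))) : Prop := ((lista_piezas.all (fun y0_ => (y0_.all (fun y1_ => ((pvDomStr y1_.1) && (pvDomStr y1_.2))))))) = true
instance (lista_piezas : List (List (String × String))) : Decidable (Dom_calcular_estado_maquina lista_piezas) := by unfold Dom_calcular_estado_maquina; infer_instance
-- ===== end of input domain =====

-- B replaces A's list-of-colors plus three membership scans by one pass keeping the
-- minimum severity rank; same return value, an alternative decomposition.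

-- ===== PORT A =====
-- p.get("estado_color"): first-match lookup in the association list (exact for dicts)
def pvGetColor (p : List (String × String)) : Option String :=
  (p.find? (fun kv => kv.1 == "estado_color")).map (·.2)

def calcular_estado_maquina (lista_piezas : List (List (String × String))) : List (String × String) :=
  if lista_piezas = [] then
    [("estado_texto", "Sin piezas"), ("estado_color", "gray")]
  else
    let colores := lista_piezas.map pvGetColor
    if colores.contains (some "black") then
      [("estado_texto", "Pieza rota"), ("estado_color", "black")]
    else if colores.contains (some "red") then
      [("estado_texto", "Vencida"), ("estado_color", "red")]
    else if colores.contains (some "yellow") then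
      [("estado_texto", "Advertencia"), ("estado_color", "yellow")]
    else
      [("estado_texto", "Óptima"), ("estado_color", "green")]

-- ===== PORT B =====
-- rank_of.get(color, 3): the three-entry dict lookup with default, written as a match (exact)
def pvRankOf (o : Option String) : Nat :=
  match o with
  | some s => if s = "black" then 0 else if s = "red" then 1 else if s = "yellow" then 2 else 3
  | none => 3

-- results[best]: best is always in 0..3, so the table is a total match on the index
def pvResults (best : Nat) : List (String × String) :=
  match best with
  | 0 => [("estado_texto", "Pieza rota"), ("estado_color", "black")]
  | 1 => [("estado_texto", "Vencida"), ("estado_color", "red")]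
  | 2 => [("estado_texto", "Advertencia"), ("estado_color", "yellow")]
  | _ => [("estado_texto", "Óptima"), ("estado_color", "green")]

-- the for-loop with early break on rank 0
def pvBestLoop : List (List (String × String)) → Nat → Nat
  | [], best => best
  | p :: rest, best =>
    let r := pvRankOf (pvGetColor p)
    let best' := if r < best then r else best
    if best' = 0 then best' else pvBestLoop rest best'

def calcular_estado_maquina_alt (lista_piezas : List (List (String × String))) : List (String × String) :=
  if lista_piezas = [] then
    [("estado_texto", "Sin piezas"), ("estado_color", "gray")]
  else
    pvResults (pvBestLoop lista_piezas 3)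

-- ===== PRECONDITION & SPEC =====
def Spec_calcular_estado_maquina (lista_piezas : List (List (String × String))) (out : List (String × String)) : Prop := out = calcular_estado_maquina_alt lista_piezas
instance (lista_piezas : List (List (String × String))) (out : List (String × String)) : Decidable (Spec_calcular_estado_maquina lista_piezas out) := by unfold Spec_calcular_estado_maquina; infer_instance

-- ===== CLAIM (what is proved, stated in full; the proofs are below) =====
def Claim_equal_calcular_estado_maquina : Prop := ∀ (lista_piezas : List (List (String × String))), Dom_calcular_estado_maquina lista_piezas → Spec_calcular_estado_maquina lista_piezas (calcular_estado_maquina lista_piezas)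

-- ===== LEMMAS AND PROOFS =====

-- the mathematical minimum rank of a list
def pvMR (l : List (List (String × String))) : Nat :=
  l.foldr (fun p a => min (pvRankOf (pvGetColor p)) a) 3

theorem pvMR_cons (p : List (String × String)) (rest : List (List (String × String))) :
    pvMR (p :: rest) = min (pvRankOf (pvGetColor p)) (pvMR rest) := rfl

theorem pvRank_le_three (o : Option String) : pvRankOf o ≤ 3 := by
  rcases o with _ | s
  · simp [pvRankOf]
  · simp only [pvRankOf]; split_ifs <;> omega

theorem pvMR_le_three (l : List (List (String × String))) : pvMR l ≤ 3 := by
  induction l with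
  | nil => simp [pvMR]
  | cons p rest ih => rw [pvMR_cons]; omega

theorem pvBestLoop_eq_min (l : List (List (String × String))) :
    ∀ b, b ≤ 3 → pvBestLoop l b = min b (pvMR l) := by
  induction l with
  | nil => intro b hb; simp [pvBestLoop, pvMR]; omega
  | cons p rest ih =>
    intro b hb
    rw [pvMR_cons]
    simp only [pvBestLoop]
    have hm : pvMR rest ≤ 3 := pvMR_le_three rest
    have hr3 : pvRankOf (pvGetColor p) ≤ 3 := pvRank_le_three _
    by_cases hrb : pvRankOf (pvGetColor p) < b
    · rw [if_pos hrb]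
      by_cases h0 : pvRankOf (pvGetColor p) = 0
      · rw [if_pos h0]; omega
      · rw [if_neg h0, ih _ (by omega)]; omega
    · rw [if_neg hrb]
      by_cases h0 : b = 0
      · rw [if_pos h0]; omega
      · rw [if_neg h0, ih _ hb]; omega

theorem pvMR_le_of_mem {l : List (List (String × String))} {p : List (String × String)}
    (h : p ∈ l) : pvMR l ≤ pvRankOf (pvGetColor p) := by
  induction l with
  | nil => cases h
  | cons q rest ih =>
    rw [pvMR_cons]
    rcases List.mem_cons.mp h with h | h
    · subst h; omega
    · have := ih h; omega

theorem pvLe_MR {l : List (List (String × String))} {k : Nat}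
    (hk : k ≤ 3) (h : ∀ p ∈ l, k ≤ pvRankOf (pvGetColor p)) : k ≤ pvMR l := by
  induction l with
  | nil => simpa [pvMR]
  | cons q rest ih =>
    have h1 := h q (List.mem_cons_self)
    have h2 := ih (fun p hp => h p (List.mem_cons_of_mem _ hp))
    rw [pvMR_cons]; omega

theorem pvRank_eq_iff (o : Option String) :
    (pvRankOf o = 0 ↔ o = some "black") ∧ (pvRankOf o = 1 ↔ o = some "red") ∧
    (pvRankOf o = 2 ↔ o = some "yellow") := by
  rcases o with _ | s
  · simp [pvRankOf]
  · simp only [pvRankOf, Option.some.injEq]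
    refine ⟨⟨fun h => ?_, fun h => by simp [h]⟩, ⟨fun h => ?_, fun h => by simp [h]⟩,
      ⟨fun h => ?_, fun h => by simp [h]⟩⟩ <;>
      (split_ifs at h <;> simp_all)

theorem pvContains_iff (l : List (List (String × String))) (c : String) :
    (l.map pvGetColor).contains (some c) = true ↔ ∃ p ∈ l, pvGetColor p = some c := by
  rw [List.contains_iff_mem]
  simp [List.mem_map]

-- ===== VERDICT (by name: the statement is the Claim_ definition above) =====
theorem calcular_estado_maquina_spec : Claim_equal_calcular_estado_maquina := by
  unfold Claim_equal_calcular_estado_maquina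
  intro l _
  unfold Spec_calcular_estado_maquina calcular_estado_maquina calcular_estado_maquina_alt
  by_cases hnil : l = []
  · rw [if_pos hnil, if_pos hnil]
  · rw [if_neg hnil, if_neg hnil]
    rw [pvBestLoop_eq_min l 3 (le_refl 3)]
    have hmr3 := pvMR_le_three l
    have hmin : min 3 (pvMR l) = pvMR l := by omega
    rw [hmin]
    by_cases hb : (l.map pvGetColor).contains (some "black") = true
    · obtain ⟨p, hp, hc⟩ := (pvContains_iff l "black").mp hb
      have hmr : pvMR l = 0 := by
        have h1 := pvMR_le_of_mem hp
        have h2 : pvRankOf (pvGetColor p) = 0 := (pvRank_eq_iff _).1.mpr hc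
        omega
      rw [if_pos hb, hmr]; rfl
    · have hnb : ∀ p ∈ l, 1 ≤ pvRankOf (pvGetColor p) := by
        intro p hp
        by_contra h
        have h0 : pvRankOf (pvGetColor p) = 0 := by omega
        exact hb ((pvContains_iff l "black").mpr ⟨p, hp, (pvRank_eq_iff _).1.mp h0⟩)
      have h1le := pvLe_MR (by omega) hnb
      rw [if_neg hb]
      by_cases hr : (l.map pvGetColor).contains (some "red") = true
      · obtain ⟨p, hp, hc⟩ := (pvContains_iff l "red").mp hr
        have hmr : pvMR l = 1 := by
          have := pvMR_le_of_mem hp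
          have h2 : pvRankOf (pvGetColor p) = 1 := (pvRank_eq_iff _).2.1.mpr hc
          omega
        rw [if_pos hr, hmr]; rfl
      · have hnr : ∀ p ∈ l, 2 ≤ pvRankOf (pvGetColor p) := by
          intro p hp
          by_contra h
          have h1 : pvRankOf (pvGetColor p) = 1 := by have := hnb p hp; omega
          exact hr ((pvContains_iff l "red").mpr ⟨p, hp, (pvRank_eq_iff _).2.1.mp h1⟩)
        have h2le := pvLe_MR (by omega) hnr
        rw [if_neg hr]
        by_cases hy : (l.map pvGetColor).contains (some "yellow") = true
        · obtain ⟨p, hp, hc⟩ := (pvContains_iff l "yellow").mp hy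
          have hmr : pvMR l = 2 := by
            have := pvMR_le_of_mem hp
            have h2 : pvRankOf (pvGetColor p) = 2 := (pvRank_eq_iff _).2.2.mpr hc
            omega
          rw [if_pos hy, hmr]; rfl
        · have hny : ∀ p ∈ l, 3 ≤ pvRankOf (pvGetColor p) := by
            intro p hp
            by_contra h
            have h2 : pvRankOf (pvGetColor p) = 2 := by have := hnr p hp; omega
            exact hy ((pvContains_iff l "yellow").mpr ⟨p, hp, (pvRank_eq_iff _).2.2.mp h2⟩)
          have h3le := pvLe_MR (le_refl 3) hny
          have hmr : pvMR l = 3 := by omega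
          rw [if_neg hy, hmr]; rfl
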